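-- pv_equiv track=rewrite | github.com/vishnu-madhav-2454/tirumala-darshan-prediction | build_corpus.py | remove_sidebar_content
-- ===== SOURCE A (Python) =====
-- SIDEBAR_MARKERS = [
--     "Akhanda Harinama Sankeerthana",
--     "Sealed RFPs are invited",
--     "EOI is invited for consultancy",
--     "960 Net Immovable Properties",
--     "TTD has introduced many Panchagavya",
--     "TTD - SVIMS tie up",
--     "Enriched bio-manure stocks",
--     "Draft list of 1128 Immovable",
--     "Yoga Vasishtam & Dhanvanthari",
--     "Devotees / Organisers who intend",
--     "Program List Day wise Troupes",
-- ]
--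
-- def remove_sidebar_content(text: str) -> str:
--     """Remove known sidebar repeated content blocks."""
--     lines = text.split("\n")
--     clean_lines = []
--     skip_until_blank = False
--     for line in lines:
--         if skip_until_blank:
--             if line.strip() == "":
--                 skip_until_blank = False
--             continue
--         if any(marker in line for marker in SIDEBAR_MARKERS):
--             skip_until_blank = True
--             continue
--         clean_lines.append(line)
--     return "\n".join(clean_lines)
-- ===== SOURCE B (Python) =====
-- SIDEBAR_MARKERS = [
--     "Akhanda Harinama Sankeerthana",
--     "Sealed RFPs are invited",
--     "EOI is invited for consultancy",
--     "960 Net Immovable Properties",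
--     "TTD has introduced many Panchagavya",
--     "TTD - SVIMS tie up",
--     "Enriched bio-manure stocks",
--     "Draft list of 1128 Immovable",
--     "Yoga Vasishtam & Dhanvanthari",
--     "Devotees / Organisers who intend",
--     "Program List Day wise Troupes",
-- ]
--
--
-- def remove_sidebar_content(text: str) -> str:
--     """Remove known sidebar repeated content blocks."""
--     lines = text.split("\n")
--     n = len(lines)
--     clean_lines = []
--     i = 0
--     while i < n:
--         line = lines[i]
--         if any(marker in line for marker in SIDEBAR_MARKERS):
--             # skip the marker line, then everything up to and including
--             # the first blank line that closes the block
--             i += 1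
--             while i < n and lines[i].strip() != "":
--                 i += 1
--             i += 1
--         else:
--             clean_lines.append(line)
--             i += 1
--     return "\n".join(clean_lines)
-- ===== Notes on version B (the rewrite author's own statement) =====
-- stated objective: alternative
-- what changed: Replaces the skip_until_blank boolean state machine with an index-based outer while loop that, on seeing a marker line, runs an inner loop skipping forward past the block up to and including its closing blank line, so no cross-iteration flag is maintained.
import Mathlib
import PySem

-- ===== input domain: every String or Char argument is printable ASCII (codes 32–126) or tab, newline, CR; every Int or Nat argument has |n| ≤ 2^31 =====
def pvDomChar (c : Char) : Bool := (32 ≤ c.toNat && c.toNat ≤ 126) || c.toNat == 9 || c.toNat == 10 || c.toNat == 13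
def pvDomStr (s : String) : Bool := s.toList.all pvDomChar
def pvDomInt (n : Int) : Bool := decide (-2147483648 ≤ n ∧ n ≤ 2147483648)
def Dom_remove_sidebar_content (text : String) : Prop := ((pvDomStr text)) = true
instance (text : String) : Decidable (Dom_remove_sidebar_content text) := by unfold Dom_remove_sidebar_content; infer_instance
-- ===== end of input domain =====

-- B replaces A's boolean skip_until_blank state machine by an outer scan with an
-- inner block-skipping loop (alternative decomposition, same cost).

def sidebarMarkers : List String :=
  [ "Akhanda Harinama Sankeerthana",
    "Sealed RFPs are invited",
    "EOI is invited for consultancy",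
    "960 Net Immovable Properties",
    "TTD has introduced many Panchagavya",
    "TTD - SVIMS tie up",
    "Enriched bio-manure stocks",
    "Draft list of 1128 Immovable",
    "Yoga Vasishtam & Dhanvanthari",
    "Devotees / Organisers who intend",
    "Program List Day wise Troupes" ]

-- ===== PORT A =====
-- one iteration of A's for-loop: state = (clean_lines, skip_until_blank)
def stepA : List String × Bool → String → List String × Bool
  | (clean, true), line =>
      if PySem.Str.strip line = "" then (clean, false) else (clean, true)
  | (clean, false), line =>
      if sidebarMarkers.any (fun m => PySem.Str.isIn m line) then (clean, true)
      else (clean ++ [line], false)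

def remove_sidebar_content (text : String) : String :=
  let lines := (PySem.Str.split? text "\n").getD []
  let st := lines.foldl stepA ([], false)
  PySem.Str.join "\n" st.1

-- ===== PORT B =====
-- inner while: advance past non-blank lines, then past the closing blank (if any)
def dropBlock : List String → List String
  | [] => []
  | l :: rest => if PySem.Str.strip l = "" then rest else dropBlock rest

theorem dropBlock_length_le (ls : List String) : (dropBlock ls).length ≤ ls.length := by
  induction ls with
  | nil => simp [dropBlock]
  | cons l rest ih =>
    simp only [dropBlock]
    split
    · simp
    · exact Nat.le_succ_of_le ih

-- outer while over the remaining lines, carrying clean_lines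
def altGo (acc : List String) : List String → List String
  | [] => acc
  | l :: rest =>
    if sidebarMarkers.any (fun m => PySem.Str.isIn m l) then
      altGo acc (dropBlock rest)
    else
      altGo (acc ++ [l]) rest
termination_by ls => ls.length
decreasing_by
  · exact Nat.lt_succ_of_le (dropBlock_length_le rest)
  · exact Nat.lt_succ_self _

def remove_sidebar_content_alt (text : String) : String :=
  PySem.Str.join "\n" (altGo [] ((PySem.Str.split? text "\n").getD []))

-- ===== PRECONDITION & SPEC =====
def Spec_remove_sidebar_content (text : String) (out : String) : Prop := out = remove_sidebar_content_alt text
instance (text : String) (out : String) : Decidable (Spec_remove_sidebar_content text out) := by unfold Spec_remove_sidebar_content; infer_instance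

-- ===== CLAIM (what is proved, stated in full; the proofs are below) =====
def Claim_equal_remove_sidebar_content : Prop := ∀ (text : String), Dom_remove_sidebar_content text → Spec_remove_sidebar_content text (remove_sidebar_content text)

-- ===== LEMMAS AND PROOFS =====

-- A's fold in skip state consumes exactly the lines dropBlock drops, adding nothing
theorem foldA_skip (acc : List String) (ls : List String) :
    (ls.foldl stepA (acc, true)).1 = ((dropBlock ls).foldl stepA (acc, false)).1 := by
  induction ls generalizing acc with
  | nil => simp [dropBlock]
  | cons l rest ih =>
    simp only [List.foldl_cons, dropBlock, stepA]
    split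
    · rfl
    · exact ih acc

-- A's fold from a non-skipping state computes B's outer loop
theorem foldA_eq_altGo (acc : List String) (ls : List String) :
    (ls.foldl stepA (acc, false)).1 = altGo acc ls := by
  induction hn : ls.length using Nat.strong_induction_on generalizing acc ls with
  | _ n ih =>
    cases ls with
    | nil => simp [altGo]
    | cons l rest =>
      simp only [List.foldl_cons, stepA, altGo]
      by_cases hm : sidebarMarkers.any (fun m => PySem.Str.isIn m l) = true
      · simp only [hm, if_true]
        rw [foldA_skip]
        exact ih (dropBlock rest).length
          (by rw [← hn]; exact Nat.lt_succ_of_le (dropBlock_length_le rest)) acc _ rfl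
      · simp only [hm]
        exact ih rest.length (by simp [← hn]) (acc ++ [l]) rest rfl

-- ===== VERDICT (by name: the statement is the Claim_ definition above) =====
theorem remove_sidebar_content_spec : Claim_equal_remove_sidebar_content := by
  intro text _
  unfold Spec_remove_sidebar_content remove_sidebar_content remove_sidebar_content_alt
  simp only []
  rw [foldA_eq_altGo]
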